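-- pv_equiv track=rewrite | github.com/dywsjtu/apparate | summary_graph.py | split_inputs
-- ===== SOURCE A (Python) =====
-- def split_inputs(in_list):
--     # input list may contain trainable weights
--     input_nodes = []
--     layer_name = None
--     for _input in in_list:
--         # tensor nodes are numeric by default
--         # if _input.isnumeric():
--         input_nodes.append(_input)
--         # in onnx model, weight comes ahead of other trainable weights
--         # in some cases, bias itself may be a tensor
--         if '.weight' in _input:
--             layer_name = _input
--             # break
--         elif layer_name is None and '.bias' in _input:
--             layer_name = _input
--             # break
--     return input_nodes, layer_name
-- ===== SOURCE B (Python) =====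
-- def split_inputs(in_list):
--     input_nodes = list(in_list)
--     layer_name = None
--     for _input in reversed(in_list):
--         if '.weight' in _input:
--             layer_name = _input
--             break
--     if layer_name is None:
--         for _input in in_list:
--             if '.bias' in _input:
--                 layer_name = _input
--                 break
--     return input_nodes, layer_name
-- ===== Notes on version B (the rewrite author's own statement) =====
-- stated objective: alternative
-- what changed: B decouples the list copy from the search: it copies with list(), then scans in reverse with an early break for the last '.weight' element, falling back to a forward early-break scan for the first '.bias' element, instead of A's single stateful pass maintaining layer_name.
import Mathlib
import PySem

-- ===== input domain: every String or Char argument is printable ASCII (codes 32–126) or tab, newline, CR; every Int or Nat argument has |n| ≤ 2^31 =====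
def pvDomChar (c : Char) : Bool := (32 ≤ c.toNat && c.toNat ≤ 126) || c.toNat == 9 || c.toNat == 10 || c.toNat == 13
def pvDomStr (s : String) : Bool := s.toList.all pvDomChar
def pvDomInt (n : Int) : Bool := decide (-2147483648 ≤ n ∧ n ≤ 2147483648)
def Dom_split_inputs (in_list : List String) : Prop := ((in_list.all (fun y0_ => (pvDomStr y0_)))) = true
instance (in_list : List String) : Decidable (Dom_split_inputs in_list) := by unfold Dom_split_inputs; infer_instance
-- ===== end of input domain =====

-- B decouples the copy from the search: reversed early-break scan for the last '.weight',
-- falling back to a forward scan for the first '.bias' (objective: alternative decomposition).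

-- ===== PORT A =====
-- A's single pass: append each element and update layer_name in the same loop.
def split_inputs (in_list : List String) : List String × Option String :=
  in_list.foldl
    (fun (st : List String × Option String) _input =>
      let input_nodes := st.1 ++ [_input]
      let layer_name :=
        if PySem.Str.isIn ".weight" _input then some _input
        else if st.2 = none ∧ PySem.Str.isIn ".bias" _input then some _input
        else st.2
      (input_nodes, layer_name))
    ([], none)

-- ===== PORT B =====
-- B: copy, then reversed scan with break for '.weight'; if none, forward scan for '.bias'.
def split_inputs_alt (in_list : List String) : List String × Option String :=
  let input_nodes := in_list
  let layer_name :=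
    match in_list.reverse.find? (fun _input => PySem.Str.isIn ".weight" _input) with
    | some w => some w
    | none => in_list.find? (fun _input => PySem.Str.isIn ".bias" _input)
  (input_nodes, layer_name)

-- ===== PRECONDITION & SPEC =====
def Spec_split_inputs (in_list : List String) (out : List String × Option String) : Prop := out = split_inputs_alt in_list
instance (in_list : List String) (out : List String × Option String) : Decidable (Spec_split_inputs in_list out) := by unfold Spec_split_inputs; infer_instance

-- ===== CLAIM (what is proved, stated in full; the proofs are below) =====
def Claim_equal_split_inputs : Prop := ∀ (in_list : List String), Dom_split_inputs in_list → Spec_split_inputs in_list (split_inputs in_list)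

-- ===== LEMMAS AND PROOFS =====

-- B's layer_name, generalized over the state A's loop carries in.
def pvAux (layer : Option String) (l : List String) : Option String :=
  match l.reverse.find? (fun x => PySem.Str.isIn ".weight" x) with
  | some w => some w
  | none =>
    match layer with
    | some y => some y
    | none => l.find? (fun x => PySem.Str.isIn ".bias" x)

theorem pvLoop (l : List String) (nodes : List String) (layer : Option String) :
    l.foldl
      (fun (st : List String × Option String) _input =>
        let input_nodes := st.1 ++ [_input]
        let layer_name :=
          if PySem.Str.isIn ".weight" _input then some _input
          else if st.2 = none ∧ PySem.Str.isIn ".bias" _input then some _input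
          else st.2
        (input_nodes, layer_name))
      (nodes, layer) = (nodes ++ l, pvAux layer l) := by
  induction l generalizing nodes layer with
  | nil => simp [pvAux]; cases layer <;> rfl
  | cons x t ih =>
    simp only [List.foldl_cons, ih]
    have h1 : (nodes ++ [x]) ++ t = nodes ++ x :: t := by simp
    rw [h1]
    congr 1
    simp only [pvAux, List.reverse_cons, List.find?_append]
    cases hw : t.reverse.find? (fun x => PySem.Str.isIn ".weight" x) with
    | some w => simp
    | none =>
      by_cases hx : PySem.Chars.isIn ['.', 'w', 'e', 'i', 'g', 'h', 't'] x.toList = true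
      · simp [hx]
      · cases layer with
        | some y => simp [hx]
        | none =>
          by_cases hb : PySem.Chars.isIn ['.', 'b', 'i', 'a', 's'] x.toList = true <;>
            simp [hx, hb]

-- ===== VERDICT (by name: the statement is the Claim_ definition above) =====
theorem split_inputs_spec : Claim_equal_split_inputs := by
  intro in_list _
  show split_inputs in_list = split_inputs_alt in_list
  rw [split_inputs, pvLoop]
  simp [split_inputs_alt, pvAux]
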